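-- pv_equiv track=rewrite | github.com/zeke1806/pbAffectation | src/python/algo_hongrois.py | choice_line
-- ===== SOURCE A (Python) =====
-- def choice_line (matrix):
--     """a- Choix de la ligne qui contient le moins de zero libre"""
--     line = 0
--     liste_nb_zero = list()
--     liste_sans_zero = list()
--     for line in matrix:
--         liste_nb_zero.append(line.count(0))
--     for elt in liste_nb_zero:
--         if elt != 0:
--             liste_sans_zero.append(elt)
--     line = liste_nb_zero.index(min(liste_sans_zero))
--     return line
-- ===== SOURCE B (Python) =====
-- def choice_line(matrix):
--     """Single pass: track the smallest strictly-positive zero count and the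
--     index of the first row achieving it."""
--     best_count = None
--     best_index = None
--     for i, row in enumerate(matrix):
--         c = row.count(0)
--         if c and (best_count is None or c < best_count):
--             best_count = c
--             best_index = i
--     if best_index is None:
--         raise ValueError("no row contains a zero")
--     return best_index
-- ===== Notes on version B (the rewrite author's own statement) =====
-- stated objective: simpler
-- what changed: Replaces A's three scans (build counts list, filter nonzero, min, then list.index) by one enumerate pass maintaining the running minimal positive zero-count and its first row index.
import Mathlib
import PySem

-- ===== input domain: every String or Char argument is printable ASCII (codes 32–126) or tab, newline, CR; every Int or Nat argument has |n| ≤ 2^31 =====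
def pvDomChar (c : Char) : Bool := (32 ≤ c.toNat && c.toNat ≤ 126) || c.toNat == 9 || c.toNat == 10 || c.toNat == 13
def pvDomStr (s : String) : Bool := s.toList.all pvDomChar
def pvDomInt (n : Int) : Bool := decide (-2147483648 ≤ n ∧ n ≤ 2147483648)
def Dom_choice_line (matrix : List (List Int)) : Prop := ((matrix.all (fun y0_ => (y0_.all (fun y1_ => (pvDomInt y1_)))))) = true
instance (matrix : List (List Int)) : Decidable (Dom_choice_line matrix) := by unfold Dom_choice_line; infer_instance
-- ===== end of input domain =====

-- B merges A's separate count/filter/min/index scans into one running-minimum pass; simpler, same result.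

-- ===== PORT A =====
def choice_line (matrix : List (List Int)) : Int :=
  let liste_nb_zero : List Int :=
    matrix.foldl (fun acc line => acc ++ [((PySem.List.count line (0 : Int) : Nat) : Int)]) []
  let liste_sans_zero : List Int :=
    liste_nb_zero.foldl (fun acc elt => if elt ≠ 0 then acc ++ [elt] else acc) []
  match PySem.List.min? liste_sans_zero (fun x => x) with
  | none => 0  -- min([]) raises ValueError; excluded by Pre_choice_line
  | some m =>
    match PySem.List.index? liste_nb_zero m with
    | none => 0  -- unreachable (m is a member of liste_nb_zero)
    | some i => (i : Int)

-- ===== PORT B =====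
def choice_line_alt (matrix : List (List Int)) : Int :=
  let st : Option (Int × Int) :=
    (PySem.List.enumerate matrix).foldl
      (fun (st : Option (Int × Int)) p =>
        let c : Int := ((PySem.List.count p.2 (0 : Int) : Nat) : Int)
        match st with
        | none => if c ≠ 0 then some (c, p.1) else none
        | some (bc, bi) => if c ≠ 0 ∧ c < bc then some (c, p.1) else some (bc, bi))
      none
  match st with
  | none => 0  -- raise ValueError; excluded by Pre_choice_line
  | some (_, bi) => bi

-- ===== PRECONDITION & SPEC =====
-- Pre_ excludes exactly the matrices in which no row contains a 0: there A raises
-- ValueError (min of an empty list) and B raises ValueError as well.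
def Pre_choice_line (matrix : List (List Int)) : Prop :=
  ∃ line ∈ matrix, (0 : Int) ∈ line
instance (matrix : List (List Int)) : Decidable (Pre_choice_line matrix) := by
  unfold Pre_choice_line; infer_instance
def pvWitness_choice_line : List (List Int) := [[1, 2], [0, 3]]

def Spec_choice_line (matrix : List (List Int)) (out : Int) : Prop := out = choice_line_alt matrix
instance (matrix : List (List Int)) (out : Int) : Decidable (Spec_choice_line matrix out) := by unfold Spec_choice_line; infer_instance

-- ===== CLAIM (what is proved, stated in full; the proofs are below) =====
def Claim_equal_choice_line : Prop := ∀ (matrix : List (List Int)), Dom_choice_line matrix → Pre_choice_line matrix → Spec_choice_line matrix (choice_line matrix)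

-- ===== LEMMAS AND PROOFS =====

-- B's loop body and pass, named for the proofs
def bStep (st : Option (Int × Int)) (p : Int × List Int) : Option (Int × Int) :=
  let c : Int := ((PySem.List.count p.2 (0 : Int) : Nat) : Int)
  match st with
  | none => if c ≠ 0 then some (c, p.1) else none
  | some (bc, bi) => if c ≠ 0 ∧ c < bc then some (c, p.1) else some (bc, bi)

def bFold (matrix : List (List Int)) : Option (Int × Int) :=
  (PySem.List.enumerate matrix).foldl bStep none

def counts (matrix : List (List Int)) : List Int :=
  matrix.map (fun line => ((PySem.List.count line (0 : Int) : Nat) : Int))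

-- the nonzero test, named so that simp does not normalise it away
def nzP (e : Int) : Bool := decide (e ≠ 0)

-- the common specification of B's state after the whole pass
def stSpec (matrix : List (List Int)) : Option (Int × Int) :=
  match PySem.List.min? ((counts matrix).filter nzP) (fun x => x) with
  | none => none
  | some m => (PySem.List.index? (counts matrix) m).map (fun k => (m, (k : Int)))

theorem mem_filter_nzP_of_mem {l : List Int} {x : Int} (hx : x ∈ l) (hne : x ≠ 0) :
    x ∈ l.filter nzP := by
  simp [List.mem_filter, hx, nzP, hne]

theorem min?_append_singleton (l : List Int) (m c : Int)
    (h : PySem.List.min? l (fun x => x) = some m) :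
    PySem.List.min? (l ++ [c]) (fun x => x) = some (min m c) := by
  obtain ⟨x, t, rfl⟩ : ∃ x t, l = x :: t := by
    cases l with
    | nil => simp [PySem.List.min?] at h
    | cons x t => exact ⟨x, t, rfl⟩
  rw [PySem.List.min?_id_cons] at h
  rw [List.cons_append, PySem.List.min?_id_cons]
  simp [List.foldl_append, Option.some.inj h]

theorem bFold_eq_stSpec (matrix : List (List Int)) : bFold matrix = stSpec matrix := by
  induction matrix using List.reverseRecOn with
  | nil => rfl
  | append_singleton xs row ih =>
    have hlen : (counts xs).length = xs.length := by simp [counts]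
    rw [bFold, PySem.List.enumerate_append, List.foldl_append] at *
    rw [ih]
    simp only [PySem.List.enumerate, List.foldl_cons, List.foldl_nil]
    have hcounts : counts (xs ++ [row]) = counts xs ++ [((row.count 0 : Nat) : Int)] := by
      simp [counts]
    by_cases hc0 : row.count (0 : Int) = 0
    · -- row contributes no nonzero count: filter unchanged, state kept
      have hf : (counts (xs ++ [row])).filter nzP = (counts xs).filter nzP := by
        simp [hcounts, List.filter_append, nzP, hc0]
      cases hmin : PySem.List.min? ((counts xs).filter nzP) (fun x => x) with
      | none => simp [stSpec, hf, hmin, bStep, hc0]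
      | some m =>
        have hm : m ∈ counts xs :=
          List.mem_of_mem_filter (PySem.List.min?_mem hmin)
        have hidx : PySem.List.index? (counts (xs ++ [row])) m
            = PySem.List.index? (counts xs) m := by
          rw [hcounts]; exact PySem.List.index?_append_of_mem _ hm
        obtain ⟨k, hk⟩ := Option.isSome_iff_exists.mp
          ((PySem.List.index?_isSome_iff (counts xs) m).mpr hm)
        have hk' : List.idxOf? m (counts xs) = some k := by simpa using hk
        simp only [stSpec, hf, hmin, hidx]
        simp [bStep, hc0, hk']
    · -- row has a nonzero count c
      have hcne : (((row.count (0 : Int) : Nat) : Int)) ≠ 0 := by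
        intro h; exact hc0 (by exact_mod_cast h)
      have hf : (counts (xs ++ [row])).filter nzP
          = (counts xs).filter nzP ++ [((row.count 0 : Nat) : Int)] := by
        simp [hcounts, List.filter_append, nzP, hc0]
      cases hmin : PySem.List.min? ((counts xs).filter nzP) (fun x => x) with
      | none =>
        -- no nonzero count so far: every count is 0, c becomes the min, at a fresh index
        have hfe : (counts xs).filter nzP = [] :=
          (PySem.List.min?_eq_none_iff _ _).mp hmin
        have hnotmem : (((row.count (0 : Int) : Nat) : Int)) ∉ counts xs := by
          intro hmem
          have h2 := mem_filter_nzP_of_mem hmem hcne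
          rw [hfe] at h2; simp at h2
        have hmin' : PySem.List.min? ((counts (xs ++ [row])).filter nzP)
            (fun x => x) = some (((row.count 0 : Nat) : Int)) := by
          rw [hf, hfe]; simp [PySem.List.min?]
        have hidx : PySem.List.index? (counts (xs ++ [row])) (((row.count 0 : Nat) : Int))
            = some (counts xs).length := by
          rw [hcounts]; exact PySem.List.index?_append_singleton_self _ _ hnotmem
        simp only [stSpec, hmin, hmin', hidx]
        simp [bStep, hc0, hlen]
      | some m =>
        have hmmem : m ∈ counts xs :=
          List.mem_of_mem_filter (PySem.List.min?_mem hmin)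
        have hmin' := min?_append_singleton _ m (((row.count 0 : Nat) : Int)) hmin
        rw [← hf] at hmin'
        obtain ⟨k, hk⟩ := Option.isSome_iff_exists.mp
          ((PySem.List.index?_isSome_iff (counts xs) m).mpr hmmem)
        have hk' : List.idxOf? m (counts xs) = some k := by simpa using hk
        by_cases hlt : (((row.count (0 : Int) : Nat) : Int)) < m
        · have hminmc : min m (((row.count (0 : Int) : Nat) : Int))
              = (((row.count 0 : Nat) : Int)) := by omega
          have hnotmem : (((row.count (0 : Int) : Nat) : Int)) ∉ counts xs := by
            intro hmem
            have hcf := mem_filter_nzP_of_mem hmem hcne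
            have := PySem.List.min?_isMin hmin _ hcf
            simp at this; omega
          rw [hminmc] at hmin'
          have hidx : PySem.List.index? (counts (xs ++ [row])) (((row.count 0 : Nat) : Int))
              = some (counts xs).length := by
            rw [hcounts]; exact PySem.List.index?_append_singleton_self _ _ hnotmem
          simp only [stSpec, hmin, hmin', hidx]
          simp [bStep, hc0, hlt, hlen, hk']
        · have hminmc : min m (((row.count (0 : Int) : Nat) : Int)) = m := by omega
          rw [hminmc] at hmin'
          have hidx : PySem.List.index? (counts (xs ++ [row])) m
              = PySem.List.index? (counts xs) m := by
            rw [hcounts]; exact PySem.List.index?_append_of_mem _ hmmem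
          simp only [stSpec, hmin, hmin', hidx]
          simp [bStep, hc0, hlt, hk']

theorem alt_eq (matrix : List (List Int)) :
    choice_line_alt matrix =
      match stSpec matrix with
      | none => 0
      | some (_, bi) => bi := by
  rw [← bFold_eq_stSpec]; rfl

theorem a_eq (matrix : List (List Int)) :
    choice_line matrix =
      match PySem.List.min? ((counts matrix).filter nzP) (fun x => x) with
      | none => 0
      | some m =>
        match PySem.List.index? (counts matrix) m with
        | none => 0
        | some i => (i : Int) := by
  simp only [choice_line, PySem.List.foldl_append_singleton_eq_map,
    PySem.List.foldl_append_ite_eq_filter, List.nil_append]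
  rfl

-- ===== VERDICT (by name: the statement is the Claim_ definition above) =====
theorem choice_line_spec : Claim_equal_choice_line := by
  intro matrix _ hpre
  unfold Spec_choice_line
  rw [a_eq, alt_eq]
  obtain ⟨line, hline, h0⟩ := hpre
  have hcne : (((line.count (0 : Int) : Nat) : Int)) ≠ 0 := by
    have hp : 0 < line.count (0 : Int) := List.count_pos_iff.mpr h0
    simp; omega
  have hmem : (((line.count (0 : Int) : Nat) : Int)) ∈ (counts matrix).filter nzP :=
    mem_filter_nzP_of_mem (by simp [counts]; exact ⟨line, hline, rfl⟩) hcne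
  cases hmin : PySem.List.min? ((counts matrix).filter nzP) (fun x => x) with
  | none =>
    rw [(PySem.List.min?_eq_none_iff _ _).mp hmin] at hmem
    simp at hmem
  | some m =>
    have hmmem : m ∈ counts matrix := List.mem_of_mem_filter (PySem.List.min?_mem hmin)
    cases hidx : PySem.List.index? (counts matrix) m with
    | none =>
      have := (PySem.List.index?_eq_none_iff _ _).mp hidx
      exact absurd hmmem this
    | some k =>
      have hidx' : List.idxOf? m (counts matrix) = some k := by simpa using hidx
      simp [stSpec, hmin, hidx']
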